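-- pv_equiv track=rewrite | github.com/HKBU-LC-NLP/Agent4BioPhD | lab1/practice/extract_review_references.py | split_reference_entries
-- ===== SOURCE A (Python) =====
-- from typing import List, Tuple
--
-- def split_reference_entries(ref_block: str) -> List[str]:
--     entries: List[str] = []
--     current_lines: List[str] = []
--
--     lines = ref_block.splitlines()
--     for line in lines:
--         stripped = line.strip()
--         if not stripped:
--             # blank lines: keep accumulating; we'll split on metadata markers
--             continue
--         # Metadata marker lines typically start with 'Article' or contain 'Google Scholar'/'PubMed'
--         if stripped.startswith('Article') or 'Google Scholar' in stripped or 'PubMed' in stripped or 'CAS' in stripped: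
--             # finalize: take the last non-empty line accumulated as the core reference line
--             core_line = ""
--             for prev in reversed(current_lines):
--                 if prev.strip():
--                     core_line = prev.strip()
--                     break
--             if core_line:
--                 entries.append(core_line)
--             current_lines = []
--             # do not add metadata line
--         else:
--             current_lines.append(stripped)
--
--     # If leftover lines form a final entry, add it
--     if current_lines:
--         core_line = ""
--         for prev in reversed(current_lines):
--             if prev.strip():
--                 core_line = prev.strip()
--                 break
--         if core_line:
--             entries.append(core_line)
--
--     # Deduplicate while preserving order
--     seen = set()
--     unique_entries = []
--     for e in entries:
--         if e not in seen:
--             seen.add(e)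
--             unique_entries.append(e)
--     return unique_entries
-- ===== SOURCE B (Python) =====
-- def split_reference_entries(ref_block: str):
--     # single scalar 'candidate' replaces A's accumulated list + reversed scan
--     entries = []
--     candidate = None
--     for line in ref_block.splitlines():
--         stripped = line.strip()
--         if not stripped:
--             continue
--         if stripped.startswith('Article') or 'Google Scholar' in stripped or 'PubMed' in stripped or 'CAS' in stripped:
--             if candidate is not None:
--                 entries.append(candidate)
--             candidate = None
--         else:
--             candidate = stripped
--     if candidate is not None:
--         entries.append(candidate)
--     seen = set()
--     unique_entries = []
--     for e in entries:
--         if e not in seen: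
--             seen.add(e)
--             unique_entries.append(e)
--     return unique_entries
-- ===== Notes on version B (the rewrite author's own statement) =====
-- stated objective: simpler
-- what changed: Replaces A's accumulated current_lines list and its inner reversed scan with a single scalar candidate (the last non-blank non-marker stripped line), emitted on marker lines and at the end; the order-preserving dedup stays.
import Mathlib
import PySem

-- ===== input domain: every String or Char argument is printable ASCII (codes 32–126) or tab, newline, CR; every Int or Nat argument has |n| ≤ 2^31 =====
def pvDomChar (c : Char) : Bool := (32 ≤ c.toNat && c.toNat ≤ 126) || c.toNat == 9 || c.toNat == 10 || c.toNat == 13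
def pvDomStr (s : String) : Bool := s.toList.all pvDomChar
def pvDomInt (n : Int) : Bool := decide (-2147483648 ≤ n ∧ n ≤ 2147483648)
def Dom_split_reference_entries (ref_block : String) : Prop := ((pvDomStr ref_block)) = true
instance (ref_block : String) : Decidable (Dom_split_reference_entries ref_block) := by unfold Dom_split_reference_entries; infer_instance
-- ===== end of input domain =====

-- B replaces A's accumulated segment list + reversed scan by one scalar candidate (simpler; same O(n) cost).

-- ===== PORT A =====
def sreA_marker (s : String) : Bool :=
  PySem.Str.startswith s "Article" || PySem.Str.isIn "Google Scholar" s ||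
    PySem.Str.isIn "PubMed" s || PySem.Str.isIn "CAS" s

-- 'for prev in reversed(current_lines): if prev.strip(): core_line = prev.strip(); break' (applied to cur.reverse)
def sreA_core : List String → String
  | [] => ""
  | p :: t => if PySem.Str.strip p ≠ "" then PySem.Str.strip p else sreA_core t

def sreA_loop : List String → List String → List String → List String × List String
  | entries, cur, [] => (entries, cur)
  | entries, cur, line :: rest =>
    if PySem.Str.strip line = "" then sreA_loop entries cur rest
    else if sreA_marker (PySem.Str.strip line) then
      sreA_loop
        (if sreA_core cur.reverse ≠ "" then entries ++ [sreA_core cur.reverse] else entries)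
        [] rest
    else sreA_loop entries (cur ++ [PySem.Str.strip line]) rest

-- 'if current_lines: …' leftover flush
def sreA_flush (st : List String × List String) : List String :=
  if st.2 ≠ [] then
    if sreA_core st.2.reverse ≠ "" then st.1 ++ [sreA_core st.2.reverse] else st.1
  else st.1

-- 'seen = set(); for e in entries: if e not in seen: seen.add(e); unique_entries.append(e)'
def sreA_dedup (entries : List String) : List String :=
  (entries.foldl (fun (acc : PySem.Set String × List String) e =>
      if PySem.Set.contains acc.1 e then acc else (PySem.Set.add acc.1 e, acc.2 ++ [e]))
    (PySem.Set.empty, [])).2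

def split_reference_entries (ref_block : String) : List String :=
  sreA_dedup (sreA_flush (sreA_loop [] [] (PySem.Str.splitlines ref_block)))

-- ===== PORT B =====
def sreB_marker (s : String) : Bool :=
  PySem.Str.startswith s "Article" || PySem.Str.isIn "Google Scholar" s ||
    PySem.Str.isIn "PubMed" s || PySem.Str.isIn "CAS" s

def sreB_step (st : List String × Option String) (line : String) : List String × Option String :=
  if PySem.Str.strip line = "" then st
  else if sreB_marker (PySem.Str.strip line) then
    ((match st.2 with | some c => st.1 ++ [c] | none => st.1), none)
  else (st.1, some (PySem.Str.strip line))

-- 'if candidate is not None: entries.append(candidate)' leftover flush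
def sreB_flush (st : List String × Option String) : List String :=
  match st.2 with | some c => st.1 ++ [c] | none => st.1

def sreB_dedup (entries : List String) : List String :=
  (entries.foldl (fun (acc : PySem.Set String × List String) e =>
      if PySem.Set.contains acc.1 e then acc else (PySem.Set.add acc.1 e, acc.2 ++ [e]))
    (PySem.Set.empty, [])).2

def split_reference_entries_alt (ref_block : String) : List String :=
  sreB_dedup (sreB_flush ((PySem.Str.splitlines ref_block).foldl sreB_step ([], none)))

-- ===== PRECONDITION & SPEC =====
def Spec_split_reference_entries (ref_block : String) (out : List String) : Prop := out = split_reference_entries_alt ref_block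
instance (ref_block : String) (out : List String) : Decidable (Spec_split_reference_entries ref_block out) := by unfold Spec_split_reference_entries; infer_instance

-- ===== CLAIM (what is proved, stated in full; the proofs are below) =====
def Claim_equal_split_reference_entries : Prop := ∀ (ref_block : String), Dom_split_reference_entries ref_block → Spec_split_reference_entries ref_block (split_reference_entries ref_block)

-- ===== LEMMAS AND PROOFS =====

lemma chars_strip_idem (l : List Char) :
    PySem.Chars.strip (PySem.Chars.strip l) = PySem.Chars.strip l := by
  unfold PySem.Chars.strip PySem.Chars.lstrip PySem.Chars.rstrip
  set p := PySem.Chars.isspace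
  set x := List.dropWhile p l with hx
  have h1 : List.dropWhile p x = x := List.dropWhile_idempotent p l
  have hpre : (List.dropWhile p x.reverse).reverse <+: x := by
    simpa using (List.dropWhile_suffix (p := p) (l := x.reverse)).reverse
  have h2 : List.dropWhile p (List.dropWhile p x.reverse).reverse = (List.dropWhile p x.reverse).reverse := by
    rw [List.dropWhile_eq_self_iff] at h1 ⊢
    intro hl
    have hlen : 0 < x.length := lt_of_lt_of_le hl hpre.length_le
    have hg := hpre.getElem (i := 0) hl
    rw [hg]
    exact h1 hlen
  rw [h2]
  have h3 : (List.dropWhile p x.reverse).reverse.reverse = List.dropWhile p x.reverse :=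
    List.reverse_reverse _
  rw [h3, List.dropWhile_idempotent]

lemma strip_idem (s : String) : PySem.Str.strip (PySem.Str.strip s) = PySem.Str.strip s := by
  simp [PySem.Str.strip, String.toList_ofList, chars_strip_idem]

lemma marker_eq (s : String) : sreB_marker s = sreA_marker s := rfl

-- with every element already stripped and non-empty, the reversed scan returns the last element
lemma sreA_core_eq (cur : List String)
    (h : ∀ x ∈ cur, PySem.Str.strip x = x ∧ x ≠ "") :
    sreA_core cur.reverse = (cur.getLast?).getD "" := by
  rcases List.eq_nil_or_concat cur with rfl | ⟨l, x, rfl⟩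
  · simp [sreA_core]
  · simp only [List.concat_eq_append] at *
    have hx := h x (by simp)
    have hrev : (l ++ [x]).reverse = x :: l.reverse := by simp
    rw [hrev]
    simp [sreA_core, hx.1, hx.2]

lemma dedup_eq (entries : List String) : sreA_dedup entries = sreB_dedup entries := rfl

lemma loop_sim (lines : List String) (entries cur : List String)
    (h : ∀ x ∈ cur, PySem.Str.strip x = x ∧ x ≠ "") :
    (sreA_loop entries cur lines).1 = (lines.foldl sreB_step (entries, cur.getLast?)).1 ∧
    (∀ x ∈ (sreA_loop entries cur lines).2, PySem.Str.strip x = x ∧ x ≠ "") ∧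
    (sreA_loop entries cur lines).2.getLast? = (lines.foldl sreB_step (entries, cur.getLast?)).2 := by
  induction lines generalizing entries cur with
  | nil => exact ⟨rfl, h, rfl⟩
  | cons line rest ih =>
    rw [List.foldl_cons]
    by_cases hb : PySem.Str.strip line = ""
    · have hA : sreA_loop entries cur (line :: rest) = sreA_loop entries cur rest := by
        rw [sreA_loop, if_pos hb]
      have hB : sreB_step (entries, cur.getLast?) line = (entries, cur.getLast?) := by
        rw [sreB_step, if_pos hb]
      rw [hA, hB]
      exact ih entries cur h
    · by_cases hm : sreA_marker (PySem.Str.strip line) = true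
      · have hE : (if sreA_core cur.reverse ≠ "" then entries ++ [sreA_core cur.reverse] else entries)
            = (match cur.getLast? with | some c => entries ++ [c] | none => entries) := by
          have hcore := sreA_core_eq cur h
          rcases List.eq_nil_or_concat cur with rfl | ⟨l, x, rfl⟩
          · simp at hcore
            simp [hcore]
          · simp only [List.concat_eq_append] at *
            have hx := h x (by simp)
            rw [List.getLast?_concat] at hcore ⊢
            simp only [Option.getD_some] at hcore
            have hc : sreA_core (x :: l.reverse) = x := by simpa using hcore
            simp [hc, hx.2]
        have hA : sreA_loop entries cur (line :: rest)
            = sreA_loop (match cur.getLast? with | some c => entries ++ [c] | none => entries) [] rest := by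
          rw [sreA_loop, if_neg hb, if_pos hm, hE]
        have hB : sreB_step (entries, cur.getLast?) line
            = ((match cur.getLast? with | some c => entries ++ [c] | none => entries), none) := by
          rw [sreB_step, if_neg hb, marker_eq, if_pos hm]
        rw [hA, hB]
        have := ih (match cur.getLast? with | some c => entries ++ [c] | none => entries) [] (by simp)
        simpa using this
      · have hA : sreA_loop entries cur (line :: rest)
            = sreA_loop entries (cur ++ [PySem.Str.strip line]) rest := by
          rw [sreA_loop, if_neg hb, if_neg hm]
        have hB : sreB_step (entries, cur.getLast?) line = (entries, some (PySem.Str.strip line)) := by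
          rw [sreB_step, if_neg hb, marker_eq, if_neg hm]
        rw [hA, hB]
        have hinv : ∀ y ∈ cur ++ [PySem.Str.strip line], PySem.Str.strip y = y ∧ y ≠ "" := by
          intro y hy
          rcases List.mem_append.mp hy with hy | hy
          · exact h y hy
          · simp only [List.mem_singleton] at hy
            subst hy
            exact ⟨strip_idem line, hb⟩
        have := ih entries (cur ++ [PySem.Str.strip line]) hinv
        rwa [List.getLast?_concat] at this

-- ===== VERDICT (by name: the statement is the Claim_ definition above) =====
theorem split_reference_entries_spec : Claim_equal_split_reference_entries := by
  intro ref_block _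
  unfold Spec_split_reference_entries split_reference_entries split_reference_entries_alt
  obtain ⟨h1, h2, h3⟩ := loop_sim (PySem.Str.splitlines ref_block) [] [] (by simp)
  simp only [List.getLast?_nil] at h1 h3
  set stA := sreA_loop [] [] (PySem.Str.splitlines ref_block) with hA
  set stB := (PySem.Str.splitlines ref_block).foldl sreB_step ([], none) with hB
  rw [dedup_eq]
  congr 1
  have hcore := sreA_core_eq stA.2 h2
  unfold sreA_flush sreB_flush
  rcases List.eq_nil_or_concat stA.2 with hnil | ⟨l, x, hcc⟩
  · rw [hnil] at h3 ⊢
    simp only [List.getLast?_nil] at h3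
    simp [← h3, h1]
  · simp only [List.concat_eq_append] at hcc
    have hx := h2 x (by rw [hcc]; simp)
    rw [hcc] at hcore h3 ⊢
    rw [List.getLast?_concat] at h3 hcore
    simp only [Option.getD_some] at hcore
    have hc : sreA_core (x :: l.reverse) = x := by simpa using hcore
    rw [← h3]
    simp [hc, hx.2, h1]
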